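-- pv_equiv track=rewrite | github.com/YJOH11/loaCompass | scraper/inven_search.py | search_posts
-- ===== SOURCE A (Python) =====
-- def search_posts(posts, kw, content_search=False):
--     if not kw:  # 키워드가 비어있으면 모든 게시글 반환
--         return posts
--
--     kw = kw.lower().strip()
--     results = []
--     seen_links = set()  # 검색 결과 중복 제거용
--
--     for p in posts:
--         # 링크 기준 중복 제거
--         if p['link'] in seen_links:
--             continue
--
--         title = p['title'].lower()
--         server = p['server'].lower()
--
--         # 1. 제목만 검색할 경우
--         if not content_search:
--             if kw in title or kw in server:
--                 results.append(p)
--                 seen_links.add(p['link'])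
--         # 2. 제목+본문 검색
--         else:
--             content = p.get('content', '').lower()
--             if kw in title or kw in server or kw in content:
--                 results.append(p)
--                 seen_links.add(p['link'])
--
--     return results
-- ===== SOURCE B (Python) =====
-- def search_posts(posts, kw, content_search=False):
--     if not kw:  # empty keyword: return all posts
--         return posts
--
--     kw = kw.lower().strip()
--
--     def hit(p):
--         fields = [p['title'], p['server']]
--         if content_search:
--             fields.append(p.get('content', ''))
--         return any(kw in f.lower() for f in fields)
--
--     # a post is kept iff it matches and no earlier matching post has the same link
--     return [p for i, p in enumerate(posts)
--             if hit(p) and not any(hit(q) and q['link'] == p['link'] for q in posts[:i])]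
-- ===== Notes on version B (the rewrite author's own statement) =====
-- stated objective: alternative
-- what changed: A's stateful single pass (results list + seen-links set + continue) is replaced by a stateless quadratic comprehension: keep post i iff it matches and no earlier matching post (scan of posts[:i]) shares its link; Pre_ excludes posts missing a 'link'/'title'/'server' key (with non-empty kw), where A raises KeyError or returns only by accident of its dup-skip continue.
import Mathlib
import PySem

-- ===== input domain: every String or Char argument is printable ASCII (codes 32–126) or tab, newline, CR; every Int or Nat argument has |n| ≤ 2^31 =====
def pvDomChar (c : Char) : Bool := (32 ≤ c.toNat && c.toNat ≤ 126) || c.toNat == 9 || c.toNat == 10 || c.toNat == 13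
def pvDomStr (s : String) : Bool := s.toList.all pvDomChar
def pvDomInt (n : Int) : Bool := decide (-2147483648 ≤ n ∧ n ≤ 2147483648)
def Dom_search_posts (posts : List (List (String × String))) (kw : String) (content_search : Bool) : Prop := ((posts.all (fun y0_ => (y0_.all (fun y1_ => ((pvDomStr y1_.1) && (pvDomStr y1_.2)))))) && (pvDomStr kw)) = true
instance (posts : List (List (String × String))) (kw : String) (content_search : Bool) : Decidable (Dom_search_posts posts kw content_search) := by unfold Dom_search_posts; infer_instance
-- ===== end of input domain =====

-- B replaces A's stateful pass (results list + seen-links set) by a stateless quadratic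
-- comprehension: keep post i iff it matches and no earlier matching post shares its link.

-- ===== PORT A =====
-- p[k] for a post dict; "" default is only reached outside Pre_search_posts
def pvItem (p : List (String × String)) (k : String) : String :=
  (PySem.Dict.mk p).getD k ""

-- loop body of A: dup check first, then the branch on content_search
def pvStepA (kw : String) (content_search : Bool)
    (st : List (List (String × String)) × PySem.Set String)
    (p : List (String × String)) : List (List (String × String)) × PySem.Set String :=
  if PySem.Set.contains st.2 (pvItem p "link") then st
  else
    let title := PySem.Str.lower (pvItem p "title")
    let server := PySem.Str.lower (pvItem p "server")
    if !content_search then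
      if PySem.Str.isIn kw title || PySem.Str.isIn kw server then
        (st.1 ++ [p], PySem.Set.add st.2 (pvItem p "link"))
      else st
    else
      let content := PySem.Str.lower ((PySem.Dict.mk p).getD "content" "")
      if PySem.Str.isIn kw title || PySem.Str.isIn kw server || PySem.Str.isIn kw content then
        (st.1 ++ [p], PySem.Set.add st.2 (pvItem p "link"))
      else st

def search_posts (posts : List (List (String × String))) (kw : String) (content_search : Bool) : List (List (String × String)) :=
  if kw = "" then posts
  else
    let kw := PySem.Str.strip (PySem.Str.lower kw)
    (posts.foldl (pvStepA kw content_search) ([], PySem.Set.empty)).1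

-- ===== PORT B =====
-- B's `hit` predicate: title/server (+content when content_search), any() over them
def pvHit (kw : String) (content_search : Bool) (p : List (String × String)) : Bool :=
  let fields := [pvItem p "title", pvItem p "server"]
  let fields := if content_search then fields ++ [(PySem.Dict.mk p).getD "content" ""] else fields
  fields.any (fun f => PySem.Str.isIn kw (PySem.Str.lower f))

def search_posts_alt (posts : List (List (String × String))) (kw : String) (content_search : Bool) : List (List (String × String)) :=
  if kw = "" then posts
  else
    let kw := PySem.Str.strip (PySem.Str.lower kw)
    ((PySem.List.enumerate posts 0).filter (fun ip =>
        pvHit kw content_search ip.2 &&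
        !((PySem.List.slice posts none (some ip.1)).any
            (fun q => pvHit kw content_search q && (pvItem q "link" == pvItem ip.2 "link"))))).map (·.2)

-- ===== PRECONDITION & SPEC =====
-- Pre_ excludes posts missing a 'link'/'title'/'server' key when kw is non-empty: there Python A
-- raises KeyError, except when a duplicate-link `continue` accidentally skips the read — there A
-- returns but B (which evaluates its match predicate on every post) raises KeyError.
def Pre_search_posts (posts : List (List (String × String))) (kw : String) (content_search : Bool) : Prop :=
  kw = "" ∨ ∀ p ∈ posts,
    (p.any (fun kv => kv.1 == "link") && p.any (fun kv => kv.1 == "title") && p.any (fun kv => kv.1 == "server")) = true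
instance (posts : List (List (String × String))) (kw : String) (content_search : Bool) : Decidable (Pre_search_posts posts kw content_search) := by unfold Pre_search_posts; infer_instance

def pvWitness_search_posts : (List (List (String × String))) × String × Bool :=
  ([[("link", "l1"), ("title", "Hello"), ("server", "Lupeon")]], "lup", false)

def Spec_search_posts (posts : List (List (String × String))) (kw : String) (content_search : Bool) (out : List (List (String × String))) : Prop := out = search_posts_alt posts kw content_search
instance (posts : List (List (String × String))) (kw : String) (content_search : Bool) (out : List (List (String × String))) : Decidable (Spec_search_posts posts kw content_search out) := by unfold Spec_search_posts; infer_instance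

-- ===== CLAIM (what is proved, stated in full; the proofs are below) =====
def Claim_equal_search_posts : Prop := ∀ (posts : List (List (String × String))) (kw : String) (content_search : Bool), Dom_search_posts posts kw content_search → Pre_search_posts posts kw content_search → Spec_search_posts posts kw content_search (search_posts posts kw content_search)

-- ===== LEMMAS AND PROOFS =====

-- common intermediate form: the posts of `rest` that match and whose link does not occur on an
-- earlier matching post, the "earlier" context `pre` growing as the list is consumed
def pvF (kw : String) (cs : Bool) :
    List (List (String × String)) → List (List (String × String)) → List (List (String × String))
  | _, [] => []
  | pre, p :: rest =>
    (if pvHit kw cs p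
        && !(pre.any fun q => pvHit kw cs q && (pvItem q "link" == pvItem p "link"))
     then [p] else []) ++ pvF kw cs (pre ++ [p]) rest

-- A's match test equals B's `hit`
lemma hit_eq (kw : String) (cs : Bool) (p : List (String × String)) :
    pvHit kw cs p =
      (if !cs then
        PySem.Str.isIn kw (PySem.Str.lower (pvItem p "title")) || PySem.Str.isIn kw (PySem.Str.lower (pvItem p "server"))
      else
        PySem.Str.isIn kw (PySem.Str.lower (pvItem p "title")) || PySem.Str.isIn kw (PySem.Str.lower (pvItem p "server"))
          || PySem.Str.isIn kw (PySem.Str.lower ((PySem.Dict.mk p).getD "content" ""))) := by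
  cases cs <;> simp [pvHit, List.any, Bool.or_assoc]

-- A-side invariant: the seen-set holds exactly the links of matching posts of the consumed prefix
lemma foldl_eq_pvF (kw : String) (cs : Bool) :
    ∀ (rest pre res : List (List (String × String))) (seen : PySem.Set String),
      (∀ l, PySem.Set.contains seen l = pre.any (fun q => pvHit kw cs q && (pvItem q "link" == l))) →
      (rest.foldl (pvStepA kw cs) (res, seen)).1 = res ++ pvF kw cs pre rest := by
  intro rest
  induction rest with
  | nil => intro pre res seen _; simp [pvF]
  | cons p rest ih =>
    intro pre res seen hseen
    have hm := hit_eq kw cs p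
    by_cases hdup : PySem.Set.contains seen (pvItem p "link") = true
    · -- duplicate link: A skips; pvF's condition is false too (an earlier matching q has the link)
      have hmem := (PySem.Set.contains_iff seen (pvItem p "link")).mp hdup
      have hstep : pvStepA kw cs (res, seen) p = (res, seen) := by
        simp [pvStepA, hmem]
      have hpre : pre.any (fun q => pvHit kw cs q && (pvItem q "link" == pvItem p "link")) = true := by
        rw [← hseen]; exact hdup
      have hseen' : ∀ l, PySem.Set.contains seen l
          = (pre ++ [p]).any (fun q => pvHit kw cs q && (pvItem q "link" == l)) := by
        intro l
        rw [hseen]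
        by_cases hl : pvItem p "link" = l
        · subst hl
          simp [hpre]
        · simp only [List.any_append, List.any_cons, List.any_nil]
          have : (pvItem p "link" == l) = false := by simpa using hl
          simp [this]
      rw [List.foldl_cons, hstep, pvF]
      have hcond : (pvHit kw cs p
          && !(pre.any fun q => pvHit kw cs q && (pvItem q "link" == pvItem p "link"))) = false := by
        simp [hpre]
      rw [hcond]
      simpa using ih (pre ++ [p]) res seen hseen'
    · have hpre : pre.any (fun q => pvHit kw cs q && (pvItem q "link" == pvItem p "link")) = false := by
        rw [← hseen]; simpa using hdup
      have hnmem : pvItem p "link" ∉ seen := by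
        simpa [PySem.Set.contains_iff] using hdup
      by_cases hmatch : pvHit kw cs p = true
      · -- new matching post: A appends and records the link
        have hstep : pvStepA kw cs (res, seen) p =
            (res ++ [p], PySem.Set.add seen (pvItem p "link")) := by
          rw [hm] at hmatch
          cases cs <;> simp_all [pvStepA]
        have hseen' : ∀ l, PySem.Set.contains (PySem.Set.add seen (pvItem p "link")) l
            = (pre ++ [p]).any (fun q => pvHit kw cs q && (pvItem q "link" == l)) := by
          intro l
          simp only [List.any_append, List.any_cons, List.any_nil, ← hseen]
          simp only [PySem.Set.add, PySem.Set.contains, hmatch]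
          have hdup2 : ¬ List.contains seen (pvItem p "link") = true := hdup
          rw [if_neg hdup2]
          by_cases hl : l = pvItem p "link"
          · simp [hl, List.contains_eq_mem]
          · have hl' : (pvItem p "link" == l) = false := by
              simp [eq_comm (a := pvItem p "link") (b := l), hl]
            simp [hl, hl', List.contains_eq_mem]
        rw [List.foldl_cons, hstep, pvF]
        have hcond : (pvHit kw cs p
            && !(pre.any fun q => pvHit kw cs q && (pvItem q "link" == pvItem p "link"))) = true := by
          simp [hpre, hmatch]
        rw [hcond]
        have := ih (pre ++ [p]) (res ++ [p]) (PySem.Set.add seen (pvItem p "link")) hseen'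
        simpa using this
      · -- non-matching post: A skips; seen and pvF condition unchanged
        have hstep : pvStepA kw cs (res, seen) p = (res, seen) := by
          rw [hm] at hmatch
          cases cs <;> simp_all [pvStepA]
        have hseen' : ∀ l, PySem.Set.contains seen l
            = (pre ++ [p]).any (fun q => pvHit kw cs q && (pvItem q "link" == l)) := by
          intro l
          simp only [List.any_append, List.any_cons, List.any_nil, ← hseen]
          simp [hmatch]
        rw [List.foldl_cons, hstep, pvF]
        have hcond : (pvHit kw cs p
            && !(pre.any fun q => pvHit kw cs q && (pvItem q "link" == pvItem p "link"))) = false := by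
          simp [hmatch]
        rw [hcond]
        simpa using ih (pre ++ [p]) res seen hseen'

-- B-side: the enumerate/slice comprehension computes pvF (earlier context = take i of the full list)
lemma filter_eq_pvF (kw : String) (cs : Bool) :
    ∀ (rest pre : List (List (String × String))),
      ((PySem.List.enumerate rest (pre.length : Int)).filter (fun ip =>
          pvHit kw cs ip.2 &&
          !((PySem.List.slice (pre ++ rest) none (some ip.1)).any
              (fun q => pvHit kw cs q && (pvItem q "link" == pvItem ip.2 "link"))))).map (·.2)
        = pvF kw cs pre rest := by
  intro rest
  induction rest with
  | nil => intro pre; simp [pvF, PySem.List.enumerate_nil]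
  | cons p rest ih =>
    intro pre
    rw [PySem.List.enumerate_cons]
    have hsl : PySem.List.slice (pre ++ p :: rest) none (some (pre.length : Int)) = pre := by
      rw [PySem.List.slice_to_natCast]
      simp
    have harr : pre ++ p :: rest = (pre ++ [p]) ++ rest := by simp
    have hlen : ((pre.length : Int) + 1) = ((pre ++ [p]).length : Int) := by
      simp
    rw [List.filter_cons]
    by_cases hc : (pvHit kw cs p
        && !(pre.any fun q => pvHit kw cs q && (pvItem q "link" == pvItem p "link"))) = true
    · have : (pvHit kw cs p &&
          !((PySem.List.slice (pre ++ p :: rest) none (some (pre.length : Int))).any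
              (fun q => pvHit kw cs q && (pvItem q "link" == pvItem p "link")))) = true := by
        rw [hsl]; exact hc
      simp only [this, if_true, List.map_cons]
      rw [pvF, hc, harr, hlen, ih (pre ++ [p])]
      simp
    · have hc' : (pvHit kw cs p &&
          !((PySem.List.slice (pre ++ p :: rest) none (some (pre.length : Int))).any
              (fun q => pvHit kw cs q && (pvItem q "link" == pvItem p "link")))) = false := by
        rw [hsl]; simpa using hc
      simp only [hc', Bool.false_eq_true, if_false]
      rw [pvF, harr, hlen, ih (pre ++ [p])]
      simp only [Bool.not_eq_true] at hc
      rw [hc]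
      simp

-- ===== VERDICT (by name: the statement is the Claim_ definition above) =====
theorem search_posts_spec : Claim_equal_search_posts := by
  intro posts kw cs _ _
  unfold Spec_search_posts search_posts search_posts_alt
  by_cases hkw : kw = ""
  · simp [hkw]
  · simp only [if_neg hkw]
    rw [foldl_eq_pvF _ cs posts [] [] PySem.Set.empty
        (by intro l; simp [PySem.Set.empty, PySem.Set.contains])]
    rw [← filter_eq_pvF _ cs posts []]
    simp
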